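-- pv_equiv track=rewrite | github.com/PdxCodeGuild/class_armadillo | Code/Talieson/Lab10-black_jack_advice-v2.py | validate_units
-- ===== SOURCE A (Python) =====
-- def validate_units(input_units):
--     unit_lists = [
--         ["A", "a", "Ace", "ACE", "ace"],
--         ["K", "k", "King", "KING", "king"],
--         ["Q", "q", "Queen", "QUEEN", "queen"],
--         ["J", "j", "Jack", "JACK", "jack"],
--         ["10", "Ten", "TEN", "ten"],
--         ["9", "Nine", "NINE", "nine"],
--         ["8", "Eight", "EIGHT", "eight"],
--         ["7", "Seven", "SEVEN", "seven"],
--         ["6", "Six", "SIX", "six"],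
--         ["5", "Five", "FIVE", "five"],
--         ["4", "Four", "FOUR", "four"],
--         ["3", "Three", "THREE", "three"],
--         ["2", "Two", "TWO", "two"],
--     ]
--     for unit_list in unit_lists:
--         if input_units in unit_list:
--             return unit_list[0]
-- ===== SOURCE B (Python) =====
-- # Rule-based normalization: lowercase once and check the casing is one of the three
-- # accepted forms, then derive the symbol from the word itself (first letter for face
-- # cards, position in the number-word sequence for number cards), instead of scanning
-- # 13 hand-written alias lists.
-- _FACES = ("ace", "king", "queen", "jack")
-- _NUMBERS = ("two", "three", "four", "five", "six", "seven", "eight", "nine", "ten")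
--
-- def validate_units(input_units):
--     w = input_units.lower()
--     if input_units in (w, w.upper(), w.capitalize()):
--         if w in _FACES:
--             return w[0].upper()
--         if w in _NUMBERS:
--             return str(_NUMBERS.index(w) + 2)
--     if len(input_units) == 1 and w in ("a", "k", "q", "j"):
--         return w.upper()
--     if input_units in ("10", "9", "8", "7", "6", "5", "4", "3", "2"):
--         return input_units
--     return None
-- ===== Notes on version B (the rewrite author's own statement) =====
-- stated objective: alternative
-- what changed: Replaces the scan over 13 hand-written alias lists with rule-based normalization: lowercase once, accept exactly the three casings (lower, UPPER, Capitalized), and derive the symbol from the word itself (first letter for face cards, position in the number-word sequence for number cards), plus direct rules for single letters and digit strings.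
import Mathlib
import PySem

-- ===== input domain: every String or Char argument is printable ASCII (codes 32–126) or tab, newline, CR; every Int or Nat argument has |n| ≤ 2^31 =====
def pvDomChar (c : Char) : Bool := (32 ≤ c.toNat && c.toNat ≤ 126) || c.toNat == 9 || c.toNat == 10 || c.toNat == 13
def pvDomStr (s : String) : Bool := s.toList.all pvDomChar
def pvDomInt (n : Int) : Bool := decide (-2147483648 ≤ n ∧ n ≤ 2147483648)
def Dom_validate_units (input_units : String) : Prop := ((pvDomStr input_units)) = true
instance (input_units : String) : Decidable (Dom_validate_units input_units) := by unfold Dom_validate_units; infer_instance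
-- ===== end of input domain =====

-- B replaces A's scan of 13 hand-written alias lists by rule-based case normalization:
-- lowercase once, accept only the three casings A accepts, and derive the symbol from the
-- word itself (first letter of a face word, position in the number-word sequence) — an
-- alternative algorithm, not claimed faster.

-- ===== PORT A =====
-- the for-loop: first unit_list containing the input yields unit_list[0]; falling off the end yields None
def pvScanA (s : String) : List (List String) → Option String
  | [] => none
  | l :: ls => if s ∈ l then PySem.List.pyGet? l 0 else pvScanA s ls

def validate_units (input_units : String) : Option String :=
  pvScanA input_units
    [ ["A", "a", "Ace", "ACE", "ace"],
      ["K", "k", "King", "KING", "king"],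
      ["Q", "q", "Queen", "QUEEN", "queen"],
      ["J", "j", "Jack", "JACK", "jack"],
      ["10", "Ten", "TEN", "ten"],
      ["9", "Nine", "NINE", "nine"],
      ["8", "Eight", "EIGHT", "eight"],
      ["7", "Seven", "SEVEN", "seven"],
      ["6", "Six", "SIX", "six"],
      ["5", "Five", "FIVE", "five"],
      ["4", "Four", "FOUR", "four"],
      ["3", "Three", "THREE", "three"],
      ["2", "Two", "TWO", "two"] ]

-- ===== PORT B =====
def pvFaces : List String := ["ace", "king", "queen", "jack"]
def pvNumbers : List String := ["two", "three", "four", "five", "six", "seven", "eight", "nine", "ten"]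

-- w.capitalize(): upper first char, lower the rest — exact for the ASCII domain
def pvCapitalize (s : String) : String :=
  match s.toList with
  | [] => s
  | c :: r => String.ofList (PySem.Chars.upperChar c :: PySem.Chars.lower r)

-- Source B's control flow falls through the first if-block into branches 2 and 3; this helper is that continuation
def pvRest (input_units w : String) : Option String :=
  if input_units.toList.length = 1 ∧ (w = "a" ∨ w = "k" ∨ w = "q" ∨ w = "j") then
    some (PySem.Str.upper w)
  else if input_units ∈ (["10", "9", "8", "7", "6", "5", "4", "3", "2"] : List String) then
    some input_units
  else none

def validate_units_alt (input_units : String) : Option String :=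
  let w := PySem.Str.lower input_units
  if input_units = w ∨ input_units = PySem.Str.upper w ∨ input_units = pvCapitalize w then
    if w ∈ pvFaces then
      -- w[0].upper(): w is a nonempty face word here, so the index is in range
      match PySem.Str.pyGet? w 0 with
      | some c => some (PySem.Str.upper (String.ofList [c]))
      | none => none
    else if w ∈ pvNumbers then
      -- str(_NUMBERS.index(w) + 2): w ∈ pvNumbers, so index? succeeds
      match PySem.List.index? pvNumbers w with
      | some i => some (PySem.Int.toStr ((i : Int) + 2))
      | none => none
    else pvRest input_units w
  else pvRest input_units w

-- ===== PRECONDITION & SPEC =====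
def Spec_validate_units (input_units : String) (out : Option String) : Prop := out = validate_units_alt input_units
instance (input_units : String) (out : Option String) : Decidable (Spec_validate_units input_units out) := by unfold Spec_validate_units; infer_instance

-- ===== CLAIM (what is proved, stated in full; the proofs are below) =====
def Claim_equal_validate_units : Prop := ∀ (input_units : String), Dom_validate_units input_units → Spec_validate_units input_units (validate_units input_units)

-- ===== LEMMAS AND PROOFS =====

-- all 57 alias strings either program ever recognizes
def pvAliases : List String :=
  ["A", "a", "Ace", "ACE", "ace", "K", "k", "King", "KING", "king",
   "Q", "q", "Queen", "QUEEN", "queen", "J", "j", "Jack", "JACK", "jack",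
   "10", "Ten", "TEN", "ten", "9", "Nine", "NINE", "nine", "8", "Eight", "EIGHT", "eight",
   "7", "Seven", "SEVEN", "seven", "6", "Six", "SIX", "six", "5", "Five", "FIVE", "five",
   "4", "Four", "FOUR", "four", "3", "Three", "THREE", "three", "2", "Two", "TWO", "two"]

lemma pvScan_none (s : String) (L : List (List String)) (h : ∀ l ∈ L, s ∉ l) :
    pvScanA s L = none := by
  induction L with
  | nil => rfl
  | cons l L ih =>
    rw [pvScanA, if_neg (h l (by simp))]
    exact ih fun l' hl' => h l' (by simp [hl'])

lemma pvChar_of_toNat (c : Char) (n : Nat) (h : c.toNat = n) : c = Char.ofNat n := by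
  rw [← h, Char.ofNat_toNat]

lemma pvLowerChar_inv (c t : Char) (h : PySem.Chars.lowerChar c = t)
    (ht : 97 ≤ t.toNat) (ht2 : t.toNat ≤ 122) :
    c = t ∨ c = Char.ofNat (t.toNat - 32) := by
  unfold PySem.Chars.lowerChar at h
  split_ifs at h with hu
  · right
    simp only [PySem.Chars.isupper, Bool.and_eq_true, decide_eq_true_eq] at hu
    have h65 : 65 ≤ c.toNat := UInt32.le_iff_toNat_le.mp hu.1
    have h90 : c.toNat ≤ 90 := UInt32.le_iff_toNat_le.mp hu.2
    have hv : (c.toNat + 32).isValidChar := Or.inl (by omega)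
    have h2 := congrArg Char.toNat h
    rw [Char.toNat_ofNat, if_pos hv] at h2
    exact pvChar_of_toNat c _ (by omega)
  · left; exact h

lemma pvSingle_lower (s : String) (c : Char) (hs : s.toList = [c]) (t : Char)
    (h : PySem.Str.lower s = String.ofList [t]) : PySem.Chars.lowerChar c = t := by
  have h1 : PySem.Str.lower s = String.ofList [PySem.Chars.lowerChar c] := by
    rw [PySem.Str.lower, hs]; rfl
  have h3 := congrArg String.toList (h1.symm.trans h)
  simpa using h3

lemma pvMem_of_single (s : String) (c : Char) (hc : s.toList = [c]) (t : Char)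
    (hw : PySem.Str.lower s = String.ofList [t]) (ht : 97 ≤ t.toNat) (ht2 : t.toNat ≤ 122) :
    s = String.ofList [t] ∨ s = String.ofList [Char.ofNat (t.toNat - 32)] := by
  have h1 := pvSingle_lower s c hc t hw
  have hss : s = String.ofList [c] := by rw [← hc, String.ofList_toList]
  rcases pvLowerChar_inv c t h1 ht ht2 with h2 | h2
  · left; rw [hss, h2]
  · right; rw [hss, h2]

lemma pvRest_none (s : String) (hs : s ∉ pvAliases) :
    pvRest s (PySem.Str.lower s) = none := by
  have hd : s ∉ (["10", "9", "8", "7", "6", "5", "4", "3", "2"] : List String) := by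
    intro h3; exact hs (by fin_cases h3 <;> decide)
  have hl : ¬ (s.toList.length = 1 ∧ (PySem.Str.lower s = "a" ∨ PySem.Str.lower s = "k" ∨
      PySem.Str.lower s = "q" ∨ PySem.Str.lower s = "j")) := by
    rintro ⟨hlen, hw⟩
    obtain ⟨c, hc⟩ := List.length_eq_one_iff.mp hlen
    apply hs
    rcases hw with hw | hw | hw | hw
    · rcases pvMem_of_single s c hc 'a' hw (by decide) (by decide) with rfl | rfl <;> decide
    · rcases pvMem_of_single s c hc 'k' hw (by decide) (by decide) with rfl | rfl <;> decide
    · rcases pvMem_of_single s c hc 'q' hw (by decide) (by decide) with rfl | rfl <;> decide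
    · rcases pvMem_of_single s c hc 'j' hw (by decide) (by decide) with rfl | rfl <;> decide
  rw [pvRest, if_neg hl, if_neg hd]

-- ===== VERDICT (by name: the statement is the Claim_ definition above) =====
theorem validate_units_spec : Claim_equal_validate_units := by
  intro s _
  show validate_units s = validate_units_alt s
  by_cases hs : s ∈ pvAliases
  · fin_cases hs <;> decide
  · have hA : validate_units s = none := by
      rw [validate_units]
      apply pvScan_none
      intro l hl
      fin_cases hl <;> exact fun hm => hs (by fin_cases hm <;> decide)
    rw [hA, validate_units_alt]
    by_cases h1 : s = PySem.Str.lower s ∨ s = PySem.Str.upper (PySem.Str.lower s) ∨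
        s = pvCapitalize (PySem.Str.lower s)
    · rw [if_pos h1]
      by_cases hf : PySem.Str.lower s ∈ pvFaces
      · exfalso
        apply hs
        simp only [pvFaces, List.mem_cons, List.not_mem_nil, or_false] at hf
        rcases hf with hw | hw | hw | hw <;>
          (rw [hw] at h1; rcases h1 with rfl | rfl | rfl <;> decide)
      · rw [if_neg hf]
        by_cases hn : PySem.Str.lower s ∈ pvNumbers
        · exfalso
          apply hs
          simp only [pvNumbers, List.mem_cons, List.not_mem_nil, or_false] at hn
          rcases hn with hw | hw | hw | hw | hw | hw | hw | hw | hw <;>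
            (rw [hw] at h1; rcases h1 with rfl | rfl | rfl <;> decide)
        · rw [if_neg hn]
          exact (pvRest_none s hs).symm
    · rw [if_neg h1]
      exact (pvRest_none s hs).symm
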